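-- pv_equiv track=rewrite | github.com/flexeducation/isPrime | isPrime.py | primeTh4kPlus1
-- ===== SOURCE A (Python) =====
-- def isPrime(n):
-- 	k=0
-- 	for i in range (1,n+1):
-- 		if n % i==0:
-- 			k=k+1
-- 	if k==2:
-- 		return True
-- 	else:
-- 		return False
--
-- def primeTh4kPlus1(n):
-- 	currentNumberOf=0
-- 	currentNumber=1
-- 	while currentNumberOf<n:
-- 		currentNumber+=1
--
-- 		if isPrime(currentNumber) and currentNumber%4==1:
-- 			currentNumberOf+=1
--
-- 	return currentNumber
-- ===== SOURCE B (Python) =====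
-- def _is_prime(m):
--     if m < 2:
--         return False
--     i = 2
--     while i * i <= m:
--         if m % i == 0:
--             return False
--         i += 1
--     return True
--
-- def _next_p1mod4(m):
--     # smallest prime congruent 1 mod 4 that is > m, for m itself congruent 1 mod 4
--     c = m + 4
--     while not _is_prime(c):
--         c += 4
--     return c
--
-- def primeTh4kPlus1(n):
--     m = 1
--     for _ in range(n):
--         m = _next_p1mod4(m)
--     return m
-- ===== Notes on version B (the rewrite author's own statement) =====
-- stated objective: faster
-- what changed: B repeats n times a 'next prime congruent 1 mod 4' search that steps only through the 4k+1 residue class and tests primality by trial division up to sqrt(m), instead of A's single while-loop over every integer with a full divisor count over 1..m per candidate.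
import Mathlib
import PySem

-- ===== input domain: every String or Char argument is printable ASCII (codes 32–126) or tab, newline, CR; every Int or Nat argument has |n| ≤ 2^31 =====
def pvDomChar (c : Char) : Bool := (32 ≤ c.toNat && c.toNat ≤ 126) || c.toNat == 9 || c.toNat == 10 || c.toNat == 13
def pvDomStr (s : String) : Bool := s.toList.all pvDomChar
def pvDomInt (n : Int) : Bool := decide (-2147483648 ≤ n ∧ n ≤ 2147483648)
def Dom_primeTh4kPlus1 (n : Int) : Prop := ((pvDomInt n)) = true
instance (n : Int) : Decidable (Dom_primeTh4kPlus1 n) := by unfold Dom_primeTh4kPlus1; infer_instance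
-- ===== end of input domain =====

-- B repeats n times a 'next 4k+1 prime' search stepping only through the residue class with
-- sqrt-bounded trial division, instead of A's single scan of every integer with a full
-- divisor count per candidate: objective faster.

-- Both while-loops terminate because a later candidate passing the loop test always exists
-- (Mathlib's `Nat.exists_prime_gt_modEq_one`); the termination measures below use Nat.find of
-- that existence, and pvFindShift is the one fact the decreasing_by proofs need about it.
theorem pvFindShift {P Q : Nat → Bool} (hP : ∃ j, P j = true) (hQ : ∃ j, Q j = true)
    (hPQ : ∀ j, Q j = P (j + 1)) (h0 : P 0 = false) : Nat.find hQ < Nat.find hP := by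
  have hk := Nat.find_spec hP
  have hk1 : 1 ≤ Nat.find hP := by
    rcases Nat.eq_zero_or_pos (Nat.find hP) with h | h
    · rw [h] at hk; rw [hk] at h0; cases h0
    · exact h
  have hQk : Q (Nat.find hP - 1) = true := by
    rw [hPQ, Nat.sub_add_cancel hk1]; exact hk
  exact lt_of_le_of_lt (Nat.find_min' hQ hQk) (by omega)

-- ===== PORT A =====
-- 'def isPrime(n)': k counts the divisors of n in range(1, n+1); returns k == 2.
def pvIsPrime (n : Int) : Bool :=
  let k := (PySem.List.pyRange 1 (n + 1) 1).foldl
    (fun k i => if PySem.Int.mod n i == 0 then k + 1 else k) (0 : Int)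
  if k == 2 then true else false

-- A's isPrime as a divisor count (used by the termination argument and the proofs below)
theorem pvIsPrime_count (m : Int) (h2 : 2 ≤ m) :
    pvIsPrime m = decide ((List.range m.toNat).countP (fun j => decide ((j + 1) ∣ m.toNat)) = 2) := by
  unfold pvIsPrime
  rw [PySem.List.foldl_if_add_one, PySem.List.pyRange_one]
  have hm1 : (m + 1 - 1).toNat = m.toNat := by omega
  rw [hm1, List.countP_map]
  have hcast : m = (m.toNat : Int) := by omega
  have hcnt : ∀ j : Nat, ((fun i => PySem.Int.mod m i == 0) ∘ (fun k : Nat => (1:Int) + k)) j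
      = decide ((j + 1) ∣ m.toNat) := by
    intro j
    simp only [Function.comp]
    rw [show ((1:Int) + (j:Int)) = ((j+1 : Nat) : Int) by push_cast; ring]
    rw [Bool.eq_iff_iff]
    simp only [beq_iff_eq, decide_eq_true_eq]
    rw [PySem.Int.mod_eq_zero_iff_dvd, hcast]
    exact Int.natCast_dvd_natCast
  rw [List.countP_congr (fun j _ => by rw [hcnt j])]
  generalize (List.range m.toNat).countP (fun j => decide ((j + 1) ∣ m.toNat)) = cnt
  by_cases h : cnt = 2
  · subst h; norm_num
  · have hne : ((0:Int) + (cnt:Int)) ≠ 2 := by omega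
    simp only [h, decide_false]
    split
    · rename_i hc; simp only [beq_iff_eq] at hc; exact (hne hc).elim
    · rfl

theorem pvCountP_eq_card (N : Nat) (p : Nat → Bool) :
    (List.range N).countP p = ((Finset.range N).filter (fun j => p j = true)).card := by
  rw [Finset.card_filter]
  induction N with
  | zero => simp
  | succ n ih =>
    rw [List.range_succ, Finset.sum_range_succ, List.countP_append, ih]
    simp [List.countP_cons]

-- a prime passes A's divisor-count test (needed above the ports: the termination measure)
theorem pvCount_two_of_prime {p : Nat} (hp : p.Prime) :
    (List.range p).countP (fun j => decide ((j + 1) ∣ p)) = 2 := by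
  have h2 := hp.two_le
  rw [pvCountP_eq_card]
  have heq : (Finset.range p).filter (fun j => decide ((j + 1) ∣ p) = true) = ({0, p - 1} : Finset Nat) := by
    ext x
    simp only [Finset.mem_filter, Finset.mem_range, Finset.mem_insert, Finset.mem_singleton,
      decide_eq_true_eq]
    constructor
    · rintro ⟨hx, hdvd⟩
      rcases hp.eq_one_or_self_of_dvd _ hdvd with h | h <;> omega
    · rintro (rfl | rfl)
      · simp; omega
      · refine ⟨by omega, ?_⟩
        rw [show p - 1 + 1 = p by omega]
  rw [heq, Finset.card_insert_of_notMem (by simp; omega), Finset.card_singleton]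

theorem pvIsPrime_of_prime {p : Nat} (hp : p.Prime) : pvIsPrime (p : Int) = true := by
  have h2 := hp.two_le
  rw [pvIsPrime_count _ (by exact_mod_cast h2)]
  rw [Int.toNat_natCast]
  simp [pvCount_two_of_prime hp]

-- some later candidate passes A's loop test
theorem pvExA (c : Int) : ∃ j : Nat,
    (pvIsPrime (c + ((j : Int) + 1)) && (PySem.Int.mod (c + ((j : Int) + 1)) 4 == 1)) = true := by
  obtain ⟨p, hp, hgt, hmod⟩ := Nat.exists_prime_gt_modEq_one (k := 4) (max c.toNat 4) (by norm_num)
  have hp4 : p % 4 = 1 := by unfold Nat.ModEq at hmod; omega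
  have hpc : c < (p : Int) := by
    have h1 : c ≤ (c.toNat : Int) := Int.self_le_toNat c
    have h2 : c.toNat < p := lt_of_le_of_lt (le_max_left _ _) hgt
    omega
  refine ⟨((p : Int) - c - 1).toNat, ?_⟩
  have hj : (((((p : Int) - c - 1).toNat) : Int)) = (p : Int) - c - 1 :=
    Int.toNat_of_nonneg (by omega)
  rw [hj, show c + ((p : Int) - c - 1 + 1) = (p : Int) by ring]
  rw [pvIsPrime_of_prime hp]
  have hm : PySem.Int.mod (p : Int) 4 = ((p % 4 : Nat) : Int) := by
    rw [PySem.Int.mod_eq_emod_of_pos (by norm_num)]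
    omega
  rw [hm, hp4]
  rfl

-- 'while currentNumberOf < n: currentNumber += 1; if isPrime(...) and ... % 4 == 1: currentNumberOf += 1'
def primeTh4kPlus1Loop (n count cur : Int) : Int :=
  if count < n then
    let cur' := cur + 1
    if pvIsPrime cur' && (PySem.Int.mod cur' 4 == 1) then
      primeTh4kPlus1Loop n (count + 1) cur'
    else
      primeTh4kPlus1Loop n count cur'
  else cur
termination_by ((n - count).toNat, Nat.find (pvExA cur))
decreasing_by
  · exact Prod.Lex.left _ _ (by omega)
  · exact Prod.Lex.right _ (by
      rename_i hlt htest
      refine pvFindShift (pvExA cur) (pvExA (cur + 1)) (fun j => ?_) ?_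
      · rw [show (cur + 1) + ((j:Int) + 1) = cur + (((j+1 : Nat) : Int) + 1) by push_cast; ring]
      · rw [Bool.not_eq_true] at htest
        rw [show cur + (((0:Nat) : Int) + 1) = cur + 1 by norm_num]
        exact htest)

def primeTh4kPlus1 (n : Int) : Int := primeTh4kPlus1Loop n 0 1

-- ===== PORT B =====
-- 'def _is_prime(m)': trial division 'while i * i <= m'; the fuel argument only makes the
-- recursion structural and is never exhausted (fuel m.toNat + 1 covers every iteration).
def pvTrialFuel (m i : Int) : Nat → Bool
  | 0 => true
  | fuel + 1 =>
    if i * i ≤ m then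
      if PySem.Int.mod m i == 0 then false
      else pvTrialFuel m (i + 1) fuel
    else true

def pvIsPrimeAlt (m : Int) : Bool :=
  if m < 2 then false else pvTrialFuel m 2 (m.toNat + 1)

theorem pvTrialFuel_of_no_divisor (m : Int) :
    ∀ (fuel : Nat) (i : Int), (∀ j : Int, i ≤ j → j * j ≤ m → ¬ j ∣ m) →
      pvTrialFuel m i fuel = true := by
  intro fuel
  induction fuel with
  | zero => intro i _; rfl
  | succ f ih =>
    intro i h
    rw [pvTrialFuel]
    split
    · rename_i hle
      have hnd : ¬ (PySem.Int.mod m i == 0) = true := by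
        simp only [beq_iff_eq]
        rw [PySem.Int.mod_eq_zero_iff_dvd]
        exact h i le_rfl hle
      rw [if_neg hnd]
      exact ih (i + 1) (fun j hj => h j (by omega))
    · rfl

theorem pvIsPrimeAlt_of_prime {p : Nat} (hp : p.Prime) : pvIsPrimeAlt (p : Int) = true := by
  have h2 := hp.two_le
  unfold pvIsPrimeAlt
  rw [if_neg (by exact_mod_cast Nat.not_lt.mpr h2)]
  apply pvTrialFuel_of_no_divisor
  intro j hj hjj hdvd
  have hj0 : (0:Int) ≤ j := by omega
  have hdn : j.toNat ∣ p := by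
    have : (j.toNat : Int) ∣ (p : Int) := by
      rw [Int.toNat_of_nonneg hj0]; exact hdvd
    exact_mod_cast this
  rcases hp.eq_one_or_self_of_dvd _ hdn with h | h
  · omega
  · have hjp : j = (p : Int) := by omega
    rw [hjp] at hjj
    have : (p : Int) * (p : Int) ≤ (p : Int) := hjj
    nlinarith [show (2:Int) ≤ (p:Int) by exact_mod_cast h2]

-- some candidate at or after c in the 1-mod-4 progression is prime (termination of _next_p1mod4)
theorem pvExNext (c : Int) (hc : c % 4 = 1) :
    ∃ j : Nat, pvIsPrimeAlt (c + 4 * (j : Int)) = true := by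
  obtain ⟨p, hp, hgt, hmod⟩ := Nat.exists_prime_gt_modEq_one (k := 4) (max c.toNat 4) (by norm_num)
  have hp4 : p % 4 = 1 := by unfold Nat.ModEq at hmod; omega
  have hpc : c < (p : Int) := by
    have h1 : c ≤ (c.toNat : Int) := Int.self_le_toNat c
    have h2 : c.toNat < p := lt_of_le_of_lt (le_max_left _ _) hgt
    omega
  have hp4' : (p : Int) % 4 = 1 := by omega
  obtain ⟨t, ht, ht0⟩ : ∃ t : Int, (p : Int) - c = 4 * t ∧ 0 ≤ t :=
    ⟨((p : Int) - c) / 4, by omega, by omega⟩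
  refine ⟨t.toNat, ?_⟩
  rw [Int.toNat_of_nonneg ht0, show c + 4 * t = (p : Int) by omega]
  exact pvIsPrimeAlt_of_prime hp

-- 'while not _is_prime(c): c += 4' — the hypothesis argument is only the invariant
-- (c ≡ 1 mod 4) that the termination measure needs.
def pvNextLoop (c : Int) (hc : c % 4 = 1) : Int :=
  if pvIsPrimeAlt c then c
  else pvNextLoop (c + 4) (by omega)
termination_by Nat.find (pvExNext c hc)
decreasing_by
  refine pvFindShift (pvExNext c hc) (pvExNext (c + 4) (by omega)) (fun j => ?_) ?_
  · rw [show (c + 4) + 4 * (j : Int) = c + 4 * (((j + 1 : Nat) : Int)) by push_cast; ring]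
  · rename_i htest
    rw [Bool.not_eq_true] at htest
    rw [show c + 4 * (((0:Nat) : Int)) = c by norm_num]
    exact htest

-- 'def _next_p1mod4(m)': c = m + 4, then the while-loop; the dite only supplies the
-- invariant the while-loop's termination measure needs (every reachable state satisfies it)
def pvNextAlt (m : Int) : Int :=
  if h : m % 4 = 1 then pvNextLoop (m + 4) (by omega) else m

-- 'm = 1; for _ in range(n): m = _next_p1mod4(m); return m'
def primeTh4kPlus1_alt (n : Int) : Int :=
  (PySem.List.pyRange 0 n 1).foldl (fun m _ => pvNextAlt m) 1

-- ===== PRECONDITION & SPEC =====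
def Spec_primeTh4kPlus1 (n : Int) (out : Int) : Prop := out = primeTh4kPlus1_alt n
instance (n : Int) (out : Int) : Decidable (Spec_primeTh4kPlus1 n out) := by
  unfold Spec_primeTh4kPlus1; infer_instance

-- ===== CLAIM (what is proved, stated in full; the proofs are below) =====
def Claim_equal_primeTh4kPlus1 : Prop := ∀ (n : Int), Dom_primeTh4kPlus1 n → Spec_primeTh4kPlus1 n (primeTh4kPlus1 n)

-- ===== LEMMAS AND PROOFS =====

-- "prime congruent 1 mod 4" and the next such number above m
def pvGoodb (m : Nat) : Bool := decide (Nat.Prime m) && decide (m % 4 = 1)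

theorem pvGoodEx (m : Nat) : ∃ p, m < p ∧ pvGoodb p = true := by
  obtain ⟨p, hp, hgt, hmod⟩ := Nat.exists_prime_gt_modEq_one (k := 4) m (by norm_num)
  refine ⟨p, hgt, ?_⟩
  have : p % 4 = 1 := by
    have := hmod; unfold Nat.ModEq at this; omega
  simp [pvGoodb, hp, this]

def pvNext (m : Nat) : Nat := Nat.find (pvGoodEx m)

theorem pvNext_gt (m : Nat) : m < pvNext m := (Nat.find_spec (pvGoodEx m)).1
theorem pvNext_good (m : Nat) : pvGoodb (pvNext m) = true := (Nat.find_spec (pvGoodEx m)).2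
theorem pvNext_min {m q : Nat} (h1 : m < q) (h2 : pvGoodb q = true) : pvNext m ≤ q :=
  Nat.find_min' (pvGoodEx m) ⟨h1, h2⟩

theorem pvNext_succ_of_not_good {m : Nat} (h : pvGoodb (m + 1) = false) :
    pvNext (m + 1) = pvNext m := by
  have g1 := pvNext_gt (m + 1)
  have g2 := pvNext_good (m + 1)
  have g3 := pvNext_gt m
  have g4 := pvNext_good m
  have hne : pvNext m ≠ m + 1 := fun he => by rw [he] at g4; simp [h] at g4
  have h1 : pvNext m ≤ pvNext (m + 1) := pvNext_min (by omega) g2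
  have h2 : pvNext (m + 1) ≤ pvNext m := pvNext_min (by omega) g4
  omega

-- full characterisation of A's isPrime: divisor count is 2 exactly for primes
theorem pvCount_div_iff (N : Nat) (h2 : 2 ≤ N) :
    ((List.range N).countP (fun j => decide ((j + 1) ∣ N)) = 2) ↔ N.Prime := by
  constructor
  · intro hc
    rw [pvCountP_eq_card] at hc
    have hset : ({0, N - 1} : Finset Nat).card = 2 := by
      rw [Finset.card_insert_of_notMem (by simp; omega), Finset.card_singleton]
    have hsub : ({0, N - 1} : Finset Nat) ⊆
        (Finset.range N).filter (fun j => decide ((j + 1) ∣ N) = true) := by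
      intro x hx
      simp only [Finset.mem_insert, Finset.mem_singleton] at hx
      rcases hx with rfl | rfl <;>
        simp [Finset.mem_filter, Finset.mem_range] <;>
        first
        | omega
        | (constructor; omega; (have : N - 1 + 1 = N := by omega); rw [this])
    have heq : ({0, N - 1} : Finset Nat)
        = (Finset.range N).filter (fun j => decide ((j + 1) ∣ N) = true) :=
      Finset.eq_of_subset_of_card_le hsub (by omega)
    rw [Nat.prime_def]
    refine ⟨h2, fun d hd => ?_⟩
    have hd1 : 1 ≤ d := Nat.one_le_iff_ne_zero.2 (by rintro rfl; simp at hd; omega)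
    have hdN : d ≤ N := Nat.le_of_dvd (by omega) hd
    have hmem : d - 1 ∈ (Finset.range N).filter (fun j => decide ((j + 1) ∣ N) = true) := by
      simp only [Finset.mem_filter, Finset.mem_range, decide_eq_true_eq]
      refine ⟨by omega, ?_⟩
      rw [show d - 1 + 1 = d by omega]
      exact hd
    rw [← heq] at hmem
    simp only [Finset.mem_insert, Finset.mem_singleton] at hmem
    omega
  · exact pvCount_two_of_prime

theorem pvIsPrime_eq (m : Int) : pvIsPrime m = decide (Nat.Prime m.toNat) := by
  by_cases hm : m ≤ 0
  · unfold pvIsPrime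
    rw [PySem.List.pyRange_one_eq_nil (by omega)]
    have : m.toNat = 0 := by omega
    simp [this, Nat.not_prime_zero]
  · by_cases h1 : m = 1
    · subst h1; decide
    · rw [pvIsPrime_count m (by omega)]
      simp only [decide_eq_decide]
      exact pvCount_div_iff m.toNat (by omega)

-- A's while-test 'isPrime(c) and c % 4 == 1' IS the pvGoodb predicate
theorem pvTestA_eq (c : Int) :
    (pvIsPrime c && (PySem.Int.mod c 4 == 1)) = pvGoodb c.toNat := by
  rw [pvIsPrime_eq]
  by_cases hp : Nat.Prime c.toNat
  · have hc2 : (2:Int) ≤ c := by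
      have := hp.two_le
      omega
    have hmod : PySem.Int.mod c 4 = c % 4 := PySem.Int.mod_eq_emod_of_pos (by norm_num)
    simp only [hp, decide_true, Bool.true_and, pvGoodb]
    rw [Bool.eq_iff_iff]
    simp only [beq_iff_eq, decide_eq_true_eq, hmod]
    omega
  · simp [hp, pvGoodb]

-- full characterisation of B's trial division, for any sufficient fuel
theorem pvTrialFuel_iff (m : Int) : ∀ (fuel : Nat) (i : Int), 2 ≤ i → (m - i).toNat < fuel →
    (pvTrialFuel m i fuel = true ↔ ∀ j : Int, i ≤ j → j * j ≤ m → ¬ j ∣ m) := by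
  intro fuel
  induction fuel with
  | zero => intro i hi hf; omega
  | succ f ih =>
    intro i hi hf
    rw [pvTrialFuel]
    by_cases hle : i * i ≤ m
    · rw [if_pos hle]
      have him : i < m := by nlinarith
      by_cases hdvd : (PySem.Int.mod m i == 0) = true
      · rw [if_pos hdvd]
        simp only [Bool.false_eq_true, false_iff]
        push Not
        simp only [beq_iff_eq] at hdvd
        rw [PySem.Int.mod_eq_zero_iff_dvd] at hdvd
        exact ⟨i, le_refl i, hle, hdvd⟩
      · rw [if_neg hdvd]
        rw [ih (i + 1) (by omega) (by omega)]
        have hnd : ¬ i ∣ m := by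
          rw [← PySem.Int.mod_eq_zero_iff_dvd]
          simpa using hdvd
        constructor
        · intro h j hj hjj
          rcases eq_or_lt_of_le hj with rfl | hlt
          · exact hnd
          · exact h j (by omega) hjj
        · intro h j hj hjj
          exact h j (by omega) hjj
    · rw [if_neg hle]
      simp only [true_iff]
      intro j hj hjj
      exfalso
      apply hle
      calc i * i ≤ j * j := by nlinarith
      _ ≤ m := hjj

theorem pvIsPrimeAlt_eq (m : Int) : pvIsPrimeAlt m = decide (Nat.Prime m.toNat) := by
  unfold pvIsPrimeAlt
  by_cases hm : m < 2
  · have : m.toNat = 0 ∨ m.toNat = 1 := by omega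
    rw [if_pos hm]
    rcases this with h | h <;> simp [h, Nat.not_prime_one, Nat.not_prime_zero]
  · rw [if_neg hm]
    push Not at hm
    have hcast : m = (m.toNat : Int) := by omega
    rw [Bool.eq_iff_iff]
    rw [pvTrialFuel_iff m (m.toNat + 1) 2 (le_refl 2) (by omega)]
    rw [decide_eq_true_eq, Nat.prime_def_le_sqrt]
    constructor
    · intro h
      refine ⟨by omega, fun d hd hsq hdvd => ?_⟩
      refine h (d : Int) (by exact_mod_cast hd) ?_ ?_
      · have : d * d ≤ m.toNat := (Nat.le_sqrt.mp hsq)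
        rw [hcast]; exact_mod_cast this
      · rw [hcast]; exact_mod_cast hdvd
    · rintro ⟨-, h⟩ j hj hjj hdvd
      have hj0 : 0 ≤ j := by omega
      refine h j.toNat (by omega) ?_ ?_
      · rw [Nat.le_sqrt]
        have : (j.toNat : Int) * (j.toNat : Int) ≤ (m.toNat : Int) := by
          rw [← hcast]; convert hjj using 2 <;> omega
        exact_mod_cast this
      · have : (j.toNat : Int) ∣ (m.toNat : Int) := by
          rw [← hcast]
          convert hdvd using 1
          omega
        exact_mod_cast this

-- stepping by 4 inside the 1-mod-4 class skips no prime ≡ 1 (mod 4)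
theorem pvNext_add4 {N : Nat} (hN : N % 4 = 1) (hp : ¬ Nat.Prime (N + 4)) :
    pvNext (N + 4) = pvNext N := by
  have g4 : pvGoodb (N + 4) = false := by simp [pvGoodb, hp]
  have g1 : pvGoodb (N + 1) = false := by simp [pvGoodb]; intro _; omega
  have g2 : pvGoodb (N + 2) = false := by simp [pvGoodb]; intro _; omega
  have g3 : pvGoodb (N + 3) = false := by simp [pvGoodb]; intro _; omega
  rw [show N + 4 = N + 3 + 1 by omega,
      pvNext_succ_of_not_good (by rw [show N + 3 + 1 = N + 4 by omega]; exact g4),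
      show N + 3 = N + 2 + 1 by omega,
      pvNext_succ_of_not_good (by rw [show N + 2 + 1 = N + 3 by omega]; exact g3),
      show N + 2 = N + 1 + 1 by omega,
      pvNext_succ_of_not_good (by rw [show N + 1 + 1 = N + 2 by omega]; exact g2),
      pvNext_succ_of_not_good g1]

-- A's loop returns the (n - count)-th iterate of pvNext from cur
theorem pvLoopA_char : ∀ n count cur : Int, 1 ≤ cur →
    primeTh4kPlus1Loop n count cur = ((pvNext^[(n - count).toNat] cur.toNat : Nat) : Int) := by
  intro n count cur
  induction count, cur using primeTh4kPlus1Loop.induct n with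
  | case1 count cur hlt cur' htest ih =>
    intro hcur
    rw [primeTh4kPlus1Loop, if_pos hlt]
    simp only
    rw [if_pos htest, ih (by omega)]
    rw [pvTestA_eq] at htest
    have ht : (cur + 1).toNat = cur.toNat + 1 := by omega
    rw [ht] at htest
    have heq : pvNext cur.toNat = cur.toNat + 1 := by
      have h1 := pvNext_min (m := cur.toNat) (by omega) htest
      have h2 := pvNext_gt cur.toNat
      omega
    have hk : (n - count).toNat = (n - (count + 1)).toNat + 1 := by omega
    rw [hk, Function.iterate_succ_apply, heq, ht]
  | case2 count cur hlt cur' htest ih =>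
    intro hcur
    rw [primeTh4kPlus1Loop, if_pos hlt]
    simp only
    rw [if_neg htest, ih (by omega)]
    rw [pvTestA_eq, Bool.not_eq_true] at htest
    have ht : (cur + 1).toNat = cur.toNat + 1 := by omega
    rw [ht] at htest ⊢
    have heq : pvNext (cur.toNat + 1) = pvNext cur.toNat := pvNext_succ_of_not_good htest
    have hk : (n - count).toNat = ((n - count).toNat - 1) + 1 := by omega
    rw [hk, Function.iterate_succ_apply, Function.iterate_succ_apply, heq]
  | case3 count cur hlt =>
    intro hcur
    rw [primeTh4kPlus1Loop, if_neg hlt]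
    have : (n - count).toNat = 0 := by omega
    rw [this, Function.iterate_zero_apply]
    omega

-- B's inner while-loop from c returns the least good number ≥ c, i.e. pvNext (c - 4)
theorem pvNextLoop_char : ∀ (c : Int) (hc : c % 4 = 1), 5 ≤ c →
    pvNextLoop c hc = ((pvNext (c - 4).toNat : Nat) : Int) := by
  intro c hc
  induction c, hc using pvNextLoop.induct with
  | case1 c hc htest =>
    intro h5
    rw [pvNextLoop, if_pos htest]
    rw [pvIsPrimeAlt_eq, decide_eq_true_eq] at htest
    set N := (c - 4).toNat with hN
    have hc4 : N + 4 = c.toNat := by omega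
    have hgood : pvGoodb (N + 4) = true := by
      rw [hc4]; simp [pvGoodb, htest]; omega
    have hle := pvNext_min (m := N) (by omega) hgood
    have hgt := pvNext_gt N
    have hgoodn := pvNext_good N
    have h4 : pvNext N % 4 = 1 := by
      simp only [pvGoodb, Bool.and_eq_true, decide_eq_true_eq] at hgoodn
      exact hgoodn.2
    have hNm : N % 4 = 1 := by omega
    have : pvNext N = N + 4 := by omega
    rw [this, hc4]
    omega
  | case2 c hc htest ih =>
    intro h5
    rw [pvNextLoop, if_neg htest]
    rw [Bool.not_eq_true, pvIsPrimeAlt_eq, decide_eq_false_iff_not] at htest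
    rw [ih (by omega)]
    set N := (c - 4).toNat with hN
    have hc4 : (c + 4 - 4).toNat = N + 4 := by omega
    have hNm : N % 4 = 1 := by omega
    have hnp : ¬ Nat.Prime (N + 4) := by
      have : N + 4 = c.toNat := by omega
      rw [this]; exact htest
    rw [hc4, pvNext_add4 hNm hnp]

-- pvNext stays in the 1-mod-4 class and grows (fold invariant)
theorem pvNext_mod (N : Nat) : pvNext N % 4 = 1 := by
  have h := pvNext_good N
  simp only [pvGoodb, Bool.and_eq_true, decide_eq_true_eq] at h
  exact h.2

-- B's fold applies pvNext once per list element
theorem pvFoldB_char : ∀ (l : List Int) (m : Int), m % 4 = 1 → 1 ≤ m →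
    (l.foldl (fun m _ => pvNextAlt m) m) = ((pvNext^[l.length] m.toNat : Nat) : Int) := by
  intro l
  induction l with
  | nil => intro m h4 h1; simp; omega
  | cons a t ih =>
    intro m h4 h1
    rw [List.foldl_cons, List.length_cons]
    have hstep : pvNextAlt m = ((pvNext m.toNat : Nat) : Int) := by
      unfold pvNextAlt
      rw [dif_pos h4, pvNextLoop_char (m + 4) (by omega) (by omega)]
      congr 2
      omega
    have hm4 := pvNext_mod m.toNat
    have hgt := pvNext_gt m.toNat
    rw [hstep, ih _ (by omega) (by omega), Int.toNat_natCast, Function.iterate_succ_apply]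

-- ===== VERDICT (by name: the statement is the Claim_ definition above) =====
theorem primeTh4kPlus1_spec : Claim_equal_primeTh4kPlus1 := by
  intro n _
  unfold Spec_primeTh4kPlus1 primeTh4kPlus1 primeTh4kPlus1_alt
  rw [pvLoopA_char n 0 1 (by norm_num), pvFoldB_char _ _ (by norm_num) (by norm_num)]
  rw [PySem.List.length_pyRange_one]
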